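-- pv_equiv track=rewrite | github.com/pworth1971/kairos | DARPA/THEIA_E3/theia3_datapreprocess.py | ip_to_hierarchy
-- ===== SOURCE A (Python) =====
-- from typing import Dict, List, Tuple, Iterable
--
-- def ip_to_hierarchy(ip: str) -> List[str]:
--     parts = [x for x in ip.strip().split('.') if x]
--     out = []
--     for i, part in enumerate(parts):
--         if i == 0:
--             out.append(part)
--         else:
--             out.append(out[-1] + '.' + part)
--     return out
-- ===== SOURCE B (Python) =====
-- def ip_to_hierarchy(ip: str):
--     parts = [x for x in ip.strip().split('.') if x]
--     return ['.'.join(parts[:i + 1]) for i in range(len(parts))]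
-- ===== Notes on version B (the rewrite author's own statement) =====
-- stated objective: simpler
-- what changed: Replaces the incremental loop that extends out[-1] with a per-index slice-and-join (each cumulative prefix is recomputed independently from parts[:i+1]); no accumulator state is maintained.
import Mathlib
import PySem

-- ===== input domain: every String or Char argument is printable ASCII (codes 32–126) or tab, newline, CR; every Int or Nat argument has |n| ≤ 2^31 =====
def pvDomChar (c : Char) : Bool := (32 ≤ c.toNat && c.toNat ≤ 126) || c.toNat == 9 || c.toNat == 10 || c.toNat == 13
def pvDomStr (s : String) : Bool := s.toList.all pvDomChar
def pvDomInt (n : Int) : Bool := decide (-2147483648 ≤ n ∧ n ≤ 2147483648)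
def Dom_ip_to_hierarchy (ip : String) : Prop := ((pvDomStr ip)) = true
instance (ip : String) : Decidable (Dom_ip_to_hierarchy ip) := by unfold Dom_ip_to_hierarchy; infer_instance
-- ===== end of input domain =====

-- B replaces A's incremental accumulator (extending out[-1]) with an independent
-- slice-and-join of parts[:i+1] per index; same output, simpler state (objective: simpler).


-- ===== PORT A =====
-- parts = [x for x in ip.strip().split('.') if x]; then the incremental loop over enumerate(parts):
-- out.append(part) at i == 0, else out.append(out[-1] + '.' + part).  out[-1] is ported as
-- pyGetD out (-1) "" (a totality guard only: out is nonempty whenever the else branch runs).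
def ip_to_hierarchy (ip : String) : List String :=
  let parts := ((PySem.Str.split? (PySem.Str.strip ip) ".").getD []).filter (fun x => x ≠ "")
  (PySem.List.enumerate parts).foldl
    (fun out p =>
      if p.1 == 0 then out ++ [p.2]
      else out ++ [PySem.List.pyGetD out (-1) "" ++ "." ++ p.2]) []

-- ===== PORT B =====
-- parts as in A; then ['.'.join(parts[:i+1]) for i in range(len(parts))].
def ip_to_hierarchy_alt (ip : String) : List String :=
  let parts := ((PySem.Str.split? (PySem.Str.strip ip) ".").getD []).filter (fun x => x ≠ "")
  (PySem.List.pyRange 0 parts.length).map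
    (fun i => PySem.Str.join "." (PySem.List.slice parts none (some (i + 1))))

-- ===== PRECONDITION & SPEC =====
def Spec_ip_to_hierarchy (ip : String) (out : List String) : Prop := out = ip_to_hierarchy_alt ip
instance (ip : String) (out : List String) : Decidable (Spec_ip_to_hierarchy ip out) := by unfold Spec_ip_to_hierarchy; infer_instance

-- ===== CLAIM (what is proved, stated in full; the proofs are below) =====
def Claim_equal_ip_to_hierarchy : Prop := ∀ (ip : String), Dom_ip_to_hierarchy ip → Spec_ip_to_hierarchy ip (ip_to_hierarchy ip)

-- ===== LEMMAS AND PROOFS =====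

-- joining l ++ [x] splits off the last piece (String level, l ≠ [])
theorem join_append_singleton (sep x : String) (l : List String) (h : l ≠ []) :
    PySem.Str.join sep (l ++ [x]) = PySem.Str.join sep l ++ sep ++ x := by
  have : ∀ (cs : List Char) (p : List (List Char)) (q : List Char), p ≠ [] →
      PySem.Chars.join cs (p ++ [q]) = PySem.Chars.join cs p ++ cs ++ q := by
    intro cs p
    induction p with
    | nil => intro q h; exact absurd rfl h
    | cons a rest ih =>
      intro q _
      cases rest with
      | nil => simp [PySem.Chars.join, List.intercalate]
      | cons b rest' =>
        rw [show a :: (b :: rest') ++ [q] = a :: b :: (rest' ++ [q]) from rfl,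
          PySem.Chars.join_cons_cons,
          show b :: (rest' ++ [q]) = (b :: rest') ++ [q] from rfl,
          ih q (by simp), PySem.Chars.join_cons_cons]
        simp
  apply String.toList_inj.mp
  simp only [String.toList_append, PySem.Str.toList_join, List.map_append, List.map]
  exact this _ _ _ (by simpa using h)

theorem join_singleton' (sep x : String) : PySem.Str.join sep [x] = x := by
  apply String.toList_inj.mp
  simp [PySem.Str.toList_join, PySem.Chars.join, List.intercalate]

-- the core equivalence, over an arbitrary parts list
theorem loop_eq_map (parts : List String) :
    (PySem.List.enumerate parts).foldl
      (fun out p =>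
        if p.1 == 0 then out ++ [p.2]
        else out ++ [PySem.List.pyGetD out (-1) "" ++ "." ++ p.2]) [] =
    (PySem.List.pyRange 0 parts.length).map
      (fun i => PySem.Str.join "." (PySem.List.slice parts none (some (i + 1)))) := by
  induction parts using List.reverseRecOn with
  | nil => simp [PySem.List.enumerate, PySem.List.pyRange]
  | append_singleton l x ih =>
    rw [PySem.List.enumerate_append, List.foldl_append, ih]
    cases l with
    | nil =>
      simp only [PySem.List.enumerate, List.foldl_cons, List.foldl_nil, List.nil_append,
        List.length_nil, List.length_cons]
      norm_num
      rw [show PySem.List.pyRange 0 (1:Int) = [0] from by decide]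
      simp only [List.map_cons, List.map_nil, zero_add]
      rw [PySem.List.slice_to _ (by norm_num)]
      simp [join_singleton']
    | cons a l' =>
      set L := a :: l' with hL
      have hlen : (0:Int) < L.length := by simp [hL]
      -- left side: one fold step over [(0 + L.length, x)]
      simp only [PySem.List.enumerate, List.foldl_cons, List.foldl_nil]
      have hne : (((0 : Int) + (L.length : Int)) == 0) = false := by
        simp only [beq_eq_false_iff_ne, ne_eq, hL, List.length_cons]
        push_cast
        omega
      rw [hne]
      simp only [Bool.false_eq_true, if_false]
      -- compute pyGetD (map …) (-1) "": split the range at L.length - 1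
      have hsplit : PySem.List.pyRange 0 (L.length : Int) =
          PySem.List.pyRange 0 ((L.length : Int) - 1) ++ [(L.length : Int) - 1] := by
        rw [PySem.List.pyRange_one_append 0 ((L.length : Int) - 1) L.length (by omega) (by omega)]
        congr 1
        rw [PySem.List.pyRange_one_cons (by omega)]
        simp [PySem.List.pyRange]
      have hlast :
          PySem.List.pyGetD
            ((PySem.List.pyRange 0 (L.length : Int)).map
              (fun i => PySem.Str.join "." (PySem.List.slice L none (some (i + 1))))) (-1) ""
          = PySem.Str.join "." L := by
        rw [hsplit, List.map_append]
        simp only [List.map]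
        rw [PySem.List.pyGetD_neg_one_append_singleton]
        rw [show ((L.length : Int) - 1 + 1) = ((L.length : Nat) : Int) by omega,
          PySem.List.slice_to_natCast, List.take_length]
      rw [hlast]
      -- right side: split the new range at L.length
      have hsplit2 : PySem.List.pyRange 0 ((L ++ [x]).length : Int) =
          PySem.List.pyRange 0 (L.length : Int) ++ [(L.length : Int)] := by
        simp only [List.length_append, List.length_cons, List.length_nil]
        push_cast
        rw [PySem.List.pyRange_one_append 0 (L.length : Int) ((L.length : Int) + 1)
          (by omega) (by omega)]
        congr 1
        rw [PySem.List.pyRange_one_cons (by omega)]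
        simp [PySem.List.pyRange]
      rw [hsplit2, List.map_append]
      congr 1
      · -- prefixes below L.length agree: take (i+1) ignores the appended x
        apply List.map_congr_left
        intro i hi
        have hib := PySem.List.mem_pyRange_one.mp hi
        have h1 : PySem.List.slice (L ++ [x]) none (some (i + 1)) =
            PySem.List.slice L none (some (i + 1)) := by
          rw [show (i + 1) = (((i + 1).toNat : Nat) : Int) by omega,
            PySem.List.slice_to_natCast, PySem.List.slice_to_natCast,
            List.take_append_of_le_length (by omega)]
        rw [h1]
      · -- last element: join of the full list
        simp only [List.map]
        rw [show ((L.length : Int) + 1) = (((L ++ [x]).length : Nat) : Int) by simp,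
          PySem.List.slice_to_natCast, List.take_length]
        rw [join_append_singleton _ _ _ (by simp [hL])]

-- ===== VERDICT (by name: the statement is the Claim_ definition above) =====
theorem ip_to_hierarchy_spec : Claim_equal_ip_to_hierarchy := by
  intro ip _
  unfold Spec_ip_to_hierarchy ip_to_hierarchy ip_to_hierarchy_alt
  exact loop_eq_map _
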